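-- pv_equiv track=rewrite | github.com/cjhswe81/shopify-import | shopify_import_deerhunter.py | get_base_without_hash
-- ===== SOURCE A (Python) =====
-- def get_base_without_hash(filename):
--     """
--     Remove hash/UUID suffixes from filenames.
--     Handles multiple formats:
--     - D_M_F_3733-642_1_e450759a-fd73-4409-a7f2-6410c82dee8e -> d_m_f_3733-642
--     - D_M_F_3733-642_4f68b42b-9d99-41c0-ba7b-ee8caa2acee7 -> d_m_f_3733-642
--     - D_M_F_3733-642 -> d_m_f_3733-642 (unchanged)
--     """
--     # Keep removing suffix parts that look like hashes/UUIDs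
--     while True:
--         parts = filename.rsplit("_", 1)
--         if len(parts) == 2:
--             suffix = parts[1]
--             # UUID pattern: 8-4-4-4-12 (e.g., 4f68b42b-9d99-41c0-ba7b-ee8caa2acee7)
--             # Hash pattern: long alphanumeric string (>= 32 chars typically)
--             # Simple numeric: _1, _2, etc (handled separately)
--
--             # Check for UUID pattern (has 4 dashes and is 36 chars)
--             if "-" in suffix and len(suffix) >= 32:
--                 dash_count = suffix.count("-")
--                 # UUID has exactly 4 dashes
--                 if dash_count >= 3:  # UUID or similar hash
--                     filename = parts[0]
--                     continue
--
--             # Check for simple hash (long alphanumeric, no dashes, >= 16 chars)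
--             elif len(suffix) >= 16 and suffix.isalnum():
--                 filename = parts[0]
--                 continue
--
--             # Check for simple numeric suffix _1, _2, etc
--             elif suffix.isdigit() and len(suffix) <= 2:
--                 filename = parts[0]
--                 continue
--
--         break
--
--     return filename.lower()
-- ===== SOURCE B (Python) =====
-- def _is_strippable(part):
--     if "-" in part and len(part) >= 32:
--         return part.count("-") >= 3
--     if len(part) >= 16 and part.isalnum():
--         return True
--     return part.isdigit() and len(part) <= 2
--
--
-- def get_base_without_hash(filename):
--     parts = filename.split("_")
--     while len(parts) > 1 and _is_strippable(parts[-1]):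
--         parts.pop()
--     return "_".join(parts).lower()
-- ===== Notes on version B (the rewrite author's own statement) =====
-- stated objective: alternative
-- what changed: B tokenizes the filename once into its underscore-separated parts and pops matching suffix parts off the end of the list, instead of A's loop that re-scans the whole remaining string with a right-split on every iteration.
import Mathlib
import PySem

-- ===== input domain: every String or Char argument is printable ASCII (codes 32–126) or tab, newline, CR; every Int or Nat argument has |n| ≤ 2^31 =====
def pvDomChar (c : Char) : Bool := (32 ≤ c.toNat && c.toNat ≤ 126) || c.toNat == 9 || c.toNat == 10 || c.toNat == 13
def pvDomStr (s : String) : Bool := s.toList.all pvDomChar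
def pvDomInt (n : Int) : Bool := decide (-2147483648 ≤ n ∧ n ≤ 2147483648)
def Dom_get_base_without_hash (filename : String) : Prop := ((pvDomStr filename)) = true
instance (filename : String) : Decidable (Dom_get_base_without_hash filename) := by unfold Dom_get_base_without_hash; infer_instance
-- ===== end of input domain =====

-- B replaces A's repeated whole-string rsplit loop by one tokenization on '_' followed by a
-- pop-from-the-end pass over the parts list (objective: alternative decomposition).

-- ===== PORT A =====
-- A's suffix decision chain: the body of A's loop after 'suffix = parts[1]' decides whether to
-- strip the suffix and continue (true) or break (false), in exactly A's if/elif order.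
def pvStripA (suffix : List Char) : Bool :=
  if PySem.Chars.isIn ['-'] suffix && decide (32 ≤ suffix.length) then
    -- inner 'if dash_count >= 3: continue', else fall through to break
    decide (3 ≤ PySem.Chars.count suffix ['-'])
  else if decide (16 ≤ suffix.length) && PySem.Chars.strIsalnum suffix then true
  else if PySem.Chars.strIsdigit suffix && decide (suffix.length ≤ 2) then true
  else false

-- hand port of filename.rsplit("_", 1) for the one-char separator '_' (PySem has no rsplit):
-- scan the reversed string for the first '_'; none = no separator (Python returns [filename]),
-- some (before, after) = Python returns [before, after]. Exact.
def pvRsplitGo : List Char → List Char → Option (List Char × List Char)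
  | [], _ => none
  | c :: rest, acc => if c = '_' then some (rest.reverse, acc) else pvRsplitGo rest (c :: acc)

-- termination helper for the port's while-loop (cited by decreasing_by below)
theorem pvRsplitGo_length : ∀ (r acc b s : List Char),
    pvRsplitGo r acc = some (b, s) → b.length < r.length + acc.length := by
  intro r
  induction r with
  | nil => intro acc b s h; simp [pvRsplitGo] at h
  | cons c rest ih =>
    intro acc b s h
    by_cases hc : c = '_'
    · simp [pvRsplitGo, hc] at h
      simp [← h.1]
      omega
    · simp [pvRsplitGo, hc] at h
      have := ih (c :: acc) b s h
      simp at this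
      simp
      omega

theorem pvRsplitGo_some_lt {cs b s : List Char}
    (h : pvRsplitGo cs.reverse [] = some (b, s)) : b.length < cs.length := by
  have := pvRsplitGo_length cs.reverse [] b s h
  simpa using this

-- A's 'while True' loop on the current filename (state: the string)
def pvALoop (cs : List Char) : List Char :=
  match h : pvRsplitGo cs.reverse [] with
  | none => cs                                   -- len(parts) == 1: break
  | some (before, suffix) =>
      if pvStripA suffix then pvALoop before     -- filename = parts[0]; continue
      else cs                                    -- break
termination_by cs.length
decreasing_by exact pvRsplitGo_some_lt h

def get_base_without_hash (filename : String) : String :=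
  String.ofList (PySem.Chars.lower (pvALoop filename.toList))

-- ===== PORT B =====
-- Source B's helper _is_strippable(part)
def pvIsStrippable (part : List Char) : Bool :=
  if PySem.Chars.isIn ['-'] part && decide (32 ≤ part.length) then
    decide (3 ≤ PySem.Chars.count part ['-'])
  else if decide (16 ≤ part.length) && PySem.Chars.strIsalnum part then true
  else PySem.Chars.strIsdigit part && decide (part.length ≤ 2)

-- hand port of filename.split("_") for the one-char separator '_' (structural, keeps empty parts). Exact.
def pvSplitU : List Char → List (List Char)
  | [] => [[]]
  | c :: rest =>
    match pvSplitU rest with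
    | p :: ps => if c = '_' then [] :: p :: ps else (c :: p) :: ps
    | [] => [[]]       -- unreachable: pvSplitU never returns []

-- Source B's 'while len(parts) > 1 and _is_strippable(parts[-1]): parts.pop()'
def pvPopLoop (parts : List (List Char)) : List (List Char) :=
  if 1 < parts.length then
    if pvIsStrippable (parts.getLast?.getD []) then pvPopLoop parts.dropLast
    else parts
  else parts
termination_by parts.length
decreasing_by simp [List.length_dropLast]; omega

def get_base_without_hash_alt (filename : String) : String :=
  String.ofList (PySem.Chars.lower
    (PySem.Chars.join ['_'] (pvPopLoop (pvSplitU filename.toList))))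

-- ===== PRECONDITION & SPEC =====
def Spec_get_base_without_hash (filename : String) (out : String) : Prop := out = get_base_without_hash_alt filename
instance (filename : String) (out : String) : Decidable (Spec_get_base_without_hash filename out) := by unfold Spec_get_base_without_hash; infer_instance

-- ===== CLAIM (what is proved, stated in full; the proofs are below) =====
def Claim_equal_get_base_without_hash : Prop := ∀ (filename : String), Dom_get_base_without_hash filename → Spec_get_base_without_hash filename (get_base_without_hash filename)

-- ===== LEMMAS AND PROOFS =====

-- the two suffix predicates coincide
theorem pvStripA_eq (s : List Char) : pvStripA s = pvIsStrippable s := by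
  unfold pvStripA pvIsStrippable
  split_ifs <;> simp_all

-- definitional step of pvSplitU on a cons cell
theorem pvSplitU_cons (c : Char) (rest : List Char) :
    pvSplitU (c :: rest) =
      match pvSplitU rest with
      | p :: ps => if c = '_' then [] :: p :: ps else (c :: p) :: ps
      | [] => [[]] := rfl

theorem pvSplitU_ne_nil (cs : List Char) : pvSplitU cs ≠ [] := by
  induction cs with
  | nil => simp [pvSplitU]
  | cons c rest ih =>
    rw [pvSplitU_cons]
    cases h : pvSplitU rest with
    | nil => simp
    | cons p ps => split_ifs <;> simp

theorem pvSplitU_no_sep (cs : List Char) (h : '_' ∉ cs) : pvSplitU cs = [cs] := by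
  induction cs with
  | nil => rfl
  | cons c rest ih =>
    have hc : c ≠ '_' := fun hc => h (hc ▸ List.mem_cons_self)
    have hrest : '_' ∉ rest := fun hm => h (List.mem_cons_of_mem _ hm)
    rw [pvSplitU_cons, ih hrest]
    simp [hc]

theorem pvSplitU_append (xs ys : List Char) :
    pvSplitU (xs ++ '_' :: ys) = pvSplitU xs ++ pvSplitU ys := by
  induction xs with
  | nil =>
    rw [List.nil_append, pvSplitU_cons]
    cases h : pvSplitU ys with
    | nil => exact absurd h (pvSplitU_ne_nil ys)
    | cons p ps => simp [pvSplitU]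
  | cons c xs ih =>
    rw [List.cons_append, pvSplitU_cons, pvSplitU_cons, ih]
    cases h : pvSplitU xs with
    | nil => exact absurd h (pvSplitU_ne_nil xs)
    | cons p ps => split_ifs <;> simp

theorem pvJoin_pvSplitU (cs : List Char) :
    PySem.Chars.join ['_'] (pvSplitU cs) = cs := by
  induction cs with
  | nil => rfl
  | cons c rest ih =>
    rw [pvSplitU_cons]
    cases h : pvSplitU rest with
    | nil => exact absurd h (pvSplitU_ne_nil rest)
    | cons p ps =>
      rw [h] at ih
      show PySem.Chars.join ['_'] (if c = '_' then [] :: p :: ps else (c :: p) :: ps) = c :: rest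
      by_cases hc : c = '_'
      · subst hc
        rw [if_pos rfl, PySem.Chars.join_cons_cons, ← ih]
        simp
      · rw [if_neg hc]
        cases ps with
        | nil =>
          simp [PySem.Chars.join_singleton] at ih ⊢
          simp [ih]
        | cons q qs =>
          rw [PySem.Chars.join_cons_cons] at ih ⊢
          rw [← ih]
          simp

-- characterisation of the hand rsplit
theorem pvRsplitGo_spec : ∀ (r acc : List Char), '_' ∉ acc →
    (pvRsplitGo r acc = none ∧ '_' ∉ r) ∨
    ∃ b s, pvRsplitGo r acc = some (b, s) ∧ r.reverse ++ acc = b ++ '_' :: s ∧ '_' ∉ s := by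
  intro r
  induction r with
  | nil => intro acc h; left; exact ⟨rfl, by simp⟩
  | cons c rest ih =>
    intro acc hacc
    by_cases hc : c = '_'
    · right
      exact ⟨rest.reverse, acc, by simp [pvRsplitGo, hc], by simp [hc], hacc⟩
    · have hacc' : '_' ∉ c :: acc := by
        intro hm
        rcases List.mem_cons.mp hm with h | h
        · exact hc h.symm
        · exact hacc h
      rcases ih (c :: acc) hacc' with ⟨hnone, hmem⟩ | ⟨b, s, heq, hdec, hs⟩
      · left
        refine ⟨by simp [pvRsplitGo, hc, hnone], ?_⟩
        intro hm
        rcases List.mem_cons.mp hm with h | h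
        · exact hc h.symm
        · exact hmem h
      · right
        refine ⟨b, s, by simp [pvRsplitGo, hc, heq], ?_, hs⟩
        simpa using hdec

-- pvPopLoop steps
theorem pvPopLoop_concat_true (xs : List (List Char)) (s : List Char)
    (hxs : xs ≠ []) (hs : pvIsStrippable s = true) :
    pvPopLoop (xs ++ [s]) = pvPopLoop xs := by
  rw [pvPopLoop]
  have hlen : 1 < (xs ++ [s]).length := by
    cases xs with
    | nil => exact absurd rfl hxs
    | cons a t => simp
  rw [if_pos hlen]
  rw [List.getLast?_concat]
  simp only [Option.getD_some, hs, if_true]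
  congr 1
  simp

theorem pvPopLoop_stop (parts : List (List Char))
    (h : ¬ 1 < parts.length ∨ pvIsStrippable (parts.getLast?.getD []) = false) :
    pvPopLoop parts = parts := by
  rw [pvPopLoop]
  rcases h with h | h
  · rw [if_neg h]
  · split_ifs with h1 h2 <;> simp_all

-- the main invariant: A's string loop equals B's tokenize-then-pop loop, re-joined
theorem pvMain : ∀ (n : Nat) (cs : List Char), cs.length ≤ n →
    pvALoop cs = PySem.Chars.join ['_'] (pvPopLoop (pvSplitU cs)) := by
  intro n
  induction n with
  | zero =>
    intro cs hlen
    have hcs : cs = [] := List.length_eq_zero_iff.mp (Nat.le_zero.mp hlen)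
    subst hcs
    have hA : pvALoop [] = [] := by
      rw [pvALoop.eq_def]
      rcases pvRsplitGo_spec [].reverse [] (by simp) with ⟨hnone, _⟩ | ⟨b, s, heq, _, _⟩
      · rw [hnone]
      · exact absurd heq (by simp [pvRsplitGo])
    rw [hA]
    simp [pvSplitU, pvPopLoop, PySem.Chars.join_singleton]
  | succ n ih =>
    intro cs hlen
    rw [pvALoop.eq_def]
    rcases pvRsplitGo_spec cs.reverse [] (by simp) with ⟨hnone, hmem⟩ | ⟨b, s, heq, hdec, hs⟩
    · rw [hnone]
      have hcs : '_' ∉ cs := by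
        intro hm; exact hmem (List.mem_reverse.mpr hm)
      rw [pvSplitU_no_sep cs hcs]
      rw [pvPopLoop_stop _ (Or.inl (by simp))]
      rw [PySem.Chars.join_singleton]
    · rw [heq]
      have hcseq : cs = b ++ '_' :: s := by simpa using hdec
      have hsplit : pvSplitU cs = pvSplitU b ++ [s] := by
        rw [hcseq, pvSplitU_append, pvSplitU_no_sep s hs]
      by_cases hp : pvStripA s
      · simp only [if_pos hp]
        have hblen : b.length ≤ n := by
          have : cs.length = b.length + 1 + s.length := by
            rw [hcseq]; simp; omega
          omega
        rw [ih b hblen, hsplit]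
        rw [pvPopLoop_concat_true _ _ (pvSplitU_ne_nil b) (by rw [← pvStripA_eq]; exact hp)]
      · simp only [if_neg hp]
        have hstop : pvPopLoop (pvSplitU cs) = pvSplitU cs := by
          apply pvPopLoop_stop
          right
          rw [hsplit, List.getLast?_concat]
          simp only [Option.getD_some]
          rw [← pvStripA_eq]
          exact Bool.not_eq_true _ ▸ (by simpa using hp)
        rw [hstop, pvJoin_pvSplitU]

-- ===== VERDICT (by name: the statement is the Claim_ definition above) =====
theorem get_base_without_hash_spec : Claim_equal_get_base_without_hash := by
  intro filename _
  unfold Spec_get_base_without_hash get_base_without_hash get_base_without_hash_alt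
  rw [pvMain filename.toList.length filename.toList le_rfl]
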